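-- pv_equiv track=rewrite | github.com/yskang/AlgorithmPractice | baekjoon/python/electric_cord_2565.py | solution
-- ===== SOURCE A (Python) =====
-- from bisect import bisect_left
--
-- def solution(n: int, lines: list):
--     lines = sorted(lines, key=lambda l: l[0])
--     bs = list(map(lambda l: l[1], lines))
--
--     d = [0]
--
--     for b in bs:
--         i = bisect_left(d, b)
--         if len(d) == i:
--             d.append(b)
--         else:
--             d[i] = b
--
--     return n - (len(d)-1)
-- ===== SOURCE B (Python) =====
-- def solution(n: int, lines: list):
--     # Same task as A (n - LIS length over b-values, with A's 0 sentinel),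
--     # computed by the classic O(n^2) LIS dynamic programme instead of
--     # patience sorting with bisection.
--     lines = sorted(lines, key=lambda l: l[0])
--     seq = [0] + [l[1] for l in lines]
--     done = []  # (value, dp-length of best increasing subsequence ending there)
--     longest = 0
--     for x in seq:
--         best = 0
--         for v, d in done:
--             if v < x and d > best:
--                 best = d
--         done.append((x, best + 1))
--         if best + 1 > longest:
--             longest = best + 1
--     return n - (longest - 1)
-- ===== Notes on version B (the rewrite author's own statement) =====
-- stated objective: alternative
-- what changed: Replaces patience sorting (tail array maintained with bisect_left) by the classic quadratic LIS dynamic programme dp[i] = 1 + max dp[j] over earlier smaller elements, keeping A's 0 sentinel as the first sequence element.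
import Mathlib
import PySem

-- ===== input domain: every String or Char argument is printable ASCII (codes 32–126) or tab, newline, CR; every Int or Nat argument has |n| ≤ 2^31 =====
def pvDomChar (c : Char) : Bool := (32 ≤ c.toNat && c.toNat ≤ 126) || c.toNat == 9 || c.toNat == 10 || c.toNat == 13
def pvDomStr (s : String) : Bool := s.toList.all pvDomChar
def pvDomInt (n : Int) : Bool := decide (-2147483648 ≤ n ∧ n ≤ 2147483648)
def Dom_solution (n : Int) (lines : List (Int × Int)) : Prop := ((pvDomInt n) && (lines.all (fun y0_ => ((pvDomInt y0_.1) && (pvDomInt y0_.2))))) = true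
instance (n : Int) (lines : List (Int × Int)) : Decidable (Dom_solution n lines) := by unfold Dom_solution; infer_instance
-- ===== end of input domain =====

-- B replaces A's patience-sorting (bisect_left tail array) by the classic quadratic
-- longest-increasing-subsequence dynamic programme; same return value, similar cost.

-- ===== PORT A =====
-- one loop iteration of A: i = bisect_left(d, b); append or overwrite
def pvStep (d : List Int) (b : Int) : List Int :=
  let i := PySem.List.bisectLeft d b
  if d.length = i then d ++ [b] else d.set i b

def solution (n : Int) (lines : List (Int × Int)) : Int :=
  let ls := PySem.List.sorted lines (fun l => l.1)
  let bs := ls.map (fun l => l.2)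
  let d := bs.foldl pvStep [0]
  n - ((d.length : Int) - 1)

-- ===== PORT B =====
-- inner loop of B: best dp value among processed (value, dp) pairs with value < x
def pvBest (done : List (Int × Int)) (x : Int) : Int :=
  done.foldl (fun best p => if p.1 < x ∧ p.2 > best then p.2 else best) 0

-- one outer-loop iteration of B over state (done, longest)
def pvDpStep (st : List (Int × Int) × Int) (x : Int) : List (Int × Int) × Int :=
  let best := pvBest st.1 x
  (st.1 ++ [(x, best + 1)], if best + 1 > st.2 then best + 1 else st.2)

def solution_alt (n : Int) (lines : List (Int × Int)) : Int :=
  let ls := PySem.List.sorted lines (fun l => l.1)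
  let seq := 0 :: ls.map (fun l => l.2)
  let st := seq.foldl pvDpStep ([], 0)
  n - (st.2 - 1)

-- ===== PRECONDITION & SPEC =====
def Spec_solution (n : Int) (lines : List (Int × Int)) (out : Int) : Prop := out = solution_alt n lines
instance (n : Int) (lines : List (Int × Int)) (out : Int) : Decidable (Spec_solution n lines out) := by unfold Spec_solution; infer_instance

-- ===== CLAIM (what is proved, stated in full; the proofs are below) =====
def Claim_equal_solution : Prop := ∀ (n : Int) (lines : List (Int × Int)), Dom_solution n lines → Spec_solution n lines (solution n lines)

-- ===== LEMMAS AND PROOFS =====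

-- Invariant coupling A's tail array d with B's state (done, L):
-- d is strictly increasing, L = |d|, d[i] is realised by some processed pair of dp-value
-- i+1, and every processed pair of dp-value j+1 has its value ≥ d[j].
def pvInv (d : List Int) (done : List (Int × Int)) (L : Int) : Prop :=
  (∀ j1 j2 (h1 : j1 < d.length) (h2 : j2 < d.length), j1 < j2 → d[j1] < d[j2]) ∧
  L = (d.length : Int) ∧
  (∀ i (h : i < d.length), ∃ p ∈ done, p.2 = (i : Int) + 1 ∧ p.1 = d[i]) ∧
  (∀ p ∈ done, ∃ j, ∃ h : j < d.length, p.2 = (j : Int) + 1 ∧ d[j] ≤ p.1)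

lemma pvBestFold_spec (x : Int) (done : List (Int × Int)) (acc : Int) :
    acc ≤ done.foldl (fun best p => if p.1 < x ∧ p.2 > best then p.2 else best) acc ∧
    (done.foldl (fun best p => if p.1 < x ∧ p.2 > best then p.2 else best) acc = acc ∨
      ∃ p ∈ done, p.1 < x ∧ p.2 = done.foldl (fun best p => if p.1 < x ∧ p.2 > best then p.2 else best) acc) ∧
    (∀ p ∈ done, p.1 < x → p.2 ≤ done.foldl (fun best p => if p.1 < x ∧ p.2 > best then p.2 else best) acc) := by
  induction done generalizing acc with
  | nil => simp
  | cons q t ih =>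
    simp only [List.foldl_cons]
    obtain ⟨ih1, ih2, ih3⟩ := ih (if q.1 < x ∧ q.2 > acc then q.2 else acc)
    by_cases h : q.1 < x ∧ q.2 > acc
    · simp only [if_pos h] at ih1 ih2 ih3 ⊢
      refine ⟨le_trans (le_of_lt h.2) ih1, ?_, ?_⟩
      · rcases ih2 with h2 | ⟨p, hp, hpx, hpe⟩
        · exact Or.inr ⟨q, by simp, h.1, h2.symm⟩
        · exact Or.inr ⟨p, by simp [hp], hpx, hpe⟩
      · intro p hp hpx
        rcases List.mem_cons.mp hp with rfl | hp
        · exact ih1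
        · exact ih3 p hp hpx
    · simp only [if_neg h] at ih1 ih2 ih3 ⊢
      refine ⟨ih1, ?_, ?_⟩
      · rcases ih2 with h2 | ⟨p, hp, hpx, hpe⟩
        · exact Or.inl h2
        · exact Or.inr ⟨p, by simp [hp], hpx, hpe⟩
      · intro p hp hpx
        rcases List.mem_cons.mp hp with rfl | hp
        · have : ¬ p.2 > acc := fun hc => h ⟨hpx, hc⟩
          omega
        · exact ih3 p hp hpx

lemma pvBest_eq_bisect (d : List Int) (done : List (Int × Int)) (L x : Int)
    (hInv : pvInv d done L) : pvBest done x = (PySem.List.bisectLeft d x : Int) := by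
  obtain ⟨hsort, hL, hlow, hup⟩ := hInv
  have hle : List.Pairwise (fun a b => a ≤ b) d :=
    List.pairwise_iff_getElem.mpr (fun i j h1 h2 hij => le_of_lt (hsort i j h1 h2 hij))
  obtain ⟨hi_len, hi_lt, hi_ge⟩ := PySem.List.bisectLeft_spec d x hle
  set i := PySem.List.bisectLeft d x with hidef
  obtain ⟨hge0, hcase, hub⟩ := pvBestFold_spec x done 0
  have hBdef : pvBest done x = done.foldl (fun best p => if p.1 < x ∧ p.2 > best then p.2 else best) 0 := rfl
  rw [hBdef]
  -- upper bound: every qualifying pair has dp ≤ i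
  have hupper : ∀ p ∈ done, p.1 < x → p.2 ≤ (i : Int) := by
    intro p hp hpx
    obtain ⟨j, hj, hpe, hdj⟩ := hup p hp
    have : j < i := by
      by_contra hc
      exact absurd (lt_of_le_of_lt hdj hpx) (not_lt.mpr (hi_ge j hj (le_of_not_gt hc)))
    omega
  -- lower bound: if i > 0 there is a pair with dp = i and value d[i-1] < x
  have hlower : (i : Int) ≤ done.foldl (fun best p => if p.1 < x ∧ p.2 > best then p.2 else best) 0 := by
    rcases Nat.eq_zero_or_pos i with h0 | hpos
    · simpa [h0] using hge0
    · have hlt : i - 1 < d.length := by omega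
      obtain ⟨p, hp, hpe, hpv⟩ := hlow (i - 1) hlt
      have hdx : d[i-1] < x := hi_lt (i - 1) hlt (by omega)
      have := hub p hp (by rw [hpv]; exact hdx)
      omega
  rcases hcase with h2 | ⟨p, hp, hpx, hpe⟩
  · omega
  · have := hupper p hp hpx
    omega

lemma pvInv_step (d : List Int) (done : List (Int × Int)) (L x : Int)
    (hInv : pvInv d done L) :
    pvInv (pvStep d x) (done ++ [(x, pvBest done x + 1)])
      (if pvBest done x + 1 > L then pvBest done x + 1 else L) := by
  have hB := pvBest_eq_bisect d done L x hInv
  obtain ⟨hsort, hL, hlow, hup⟩ := hInv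
  have hle : List.Pairwise (fun a b => a ≤ b) d :=
    List.pairwise_iff_getElem.mpr (fun i j h1 h2 hij => le_of_lt (hsort i j h1 h2 hij))
  obtain ⟨hi_len, hi_lt, hi_ge⟩ := PySem.List.bisectLeft_spec d x hle
  set i := PySem.List.bisectLeft d x with hidef
  unfold pvStep
  rw [← hidef]
  by_cases hcase : d.length = i
  · -- append branch: i = |d|
    simp only [if_pos hcase]
    refine ⟨?_, ?_, ?_, ?_⟩
    · intro j1 j2 h1 h2 hij
      simp only [List.length_append, List.length_cons, List.length_nil] at h1 h2
      rcases Nat.lt_or_ge j2 d.length with hj2 | hj2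
      · rw [List.getElem_append_left (by omega), List.getElem_append_left hj2]
        exact hsort j1 j2 (by omega) hj2 hij
      · have hj2e : j2 = d.length := by omega
        subst hj2e
        rw [List.getElem_append_left (by omega), List.getElem_concat_length rfl]
        exact hi_lt j1 (by omega) (by omega)
    · simp [hB, hL, hcase]
    · intro k hk
      simp only [List.length_append, List.length_cons, List.length_nil] at hk
      rcases Nat.lt_or_ge k d.length with hklt | hkge
      · obtain ⟨p, hp, hpe, hpv⟩ := hlow k hklt
        exact ⟨p, List.mem_append_left _ hp, hpe, by rw [hpv, List.getElem_append_left hklt]⟩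
      · have hke : k = d.length := by omega
        subst hke
        refine ⟨(x, pvBest done x + 1), List.mem_append_right _ (by simp), ?_, ?_⟩
        · show pvBest done x + 1 = ((d.length : Int)) + 1
          rw [hB]; omega
        · rw [List.getElem_concat_length rfl]
    · intro p hp
      rcases List.mem_append.mp hp with hp | hp
      · obtain ⟨j, hj, hpe, hdj⟩ := hup p hp
        exact ⟨j, by simp; omega, hpe, by rw [List.getElem_append_left hj]; exact hdj⟩
      · simp at hp
        subst hp
        refine ⟨d.length, by simp, ?_, ?_⟩
        · show pvBest done x + 1 = ((d.length : Int)) + 1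
          rw [hB]; omega
        · rw [List.getElem_concat_length rfl]
  · -- overwrite branch: i < |d| and x ≤ d[i]
    have hilt : i < d.length := lt_of_le_of_ne hi_len (fun h => hcase h.symm)
    have hxle : x ≤ d[i] := hi_ge i hilt (le_refl i)
    simp only [if_neg hcase]
    refine ⟨?_, ?_, ?_, ?_⟩
    · intro j1 j2 h1 h2 hij
      simp only [List.length_set] at h1 h2
      rw [List.getElem_set, List.getElem_set]
      by_cases e1 : i = j1
      · subst e1
        simp only [if_neg (by omega : ¬ i = j2)]
        exact lt_of_le_of_lt hxle (hsort i j2 hilt h2 hij)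
      · by_cases e2 : i = j2
        · subst e2
          simp only [if_neg e1]
          exact hi_lt j1 h1 (by omega)
        · simp only [if_neg e1, if_neg e2]
          exact hsort j1 j2 h1 h2 hij
    · simp only [List.length_set]
      have : ¬ (pvBest done x + 1 > L) := by rw [hB, hL]; omega
      rw [if_neg this, hL]
    · intro k hk
      simp only [List.length_set] at hk
      by_cases hki : k = i
      · subst hki
        refine ⟨(x, pvBest done x + 1), List.mem_append_right _ (by simp), by simp [hB], ?_⟩
        rw [List.getElem_set, if_pos rfl]
      · obtain ⟨p, hp, hpe, hpv⟩ := hlow k hk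
        refine ⟨p, List.mem_append_left _ hp, hpe, ?_⟩
        rw [List.getElem_set, if_neg (by omega), hpv]
    · intro p hp
      rcases List.mem_append.mp hp with hp | hp
      · obtain ⟨j, hj, hpe, hdj⟩ := hup p hp
        refine ⟨j, by simpa using hj, hpe, ?_⟩
        rw [List.getElem_set]
        by_cases hji : i = j
        · subst hji; rw [if_pos rfl]; exact le_trans hxle hdj
        · rw [if_neg hji]; exact hdj
      · simp at hp
        subst hp
        refine ⟨i, by simpa using hilt, ?_, ?_⟩
        · show pvBest done x + 1 = ((i : Nat) : Int) + 1
          rw [hB]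
        · rw [List.getElem_set, if_pos rfl]

lemma pvFold (bs : List Int) (d : List Int) (done : List (Int × Int)) (L : Int)
    (hInv : pvInv d done L) :
    ((bs.foldl pvStep d).length : Int) = (bs.foldl pvDpStep (done, L)).2 := by
  induction bs generalizing d done L with
  | nil => exact hInv.2.1.symm
  | cons x t ih =>
    simp only [List.foldl_cons]
    exact ih (pvStep d x) (done ++ [(x, pvBest done x + 1)])
      (if pvBest done x + 1 > L then pvBest done x + 1 else L)
      (pvInv_step d done L x hInv)

lemma pvInv_init : pvInv [0] [((0 : Int), (1 : Int))] 1 := by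
  refine ⟨?_, by simp, ?_, ?_⟩
  · intro j1 j2 h1 h2 hij
    simp only [List.length_cons, List.length_nil] at h1 h2
    omega
  · intro k hk
    simp only [List.length_cons, List.length_nil] at hk
    interval_cases k
    exact ⟨(0, 1), by simp⟩
  · intro p hp
    simp at hp
    exact ⟨0, by simp, by simp [hp], by simp [hp]⟩

-- ===== VERDICT (by name: the statement is the Claim_ definition above) =====
theorem solution_spec : Claim_equal_solution := by
  intro n lines _
  unfold Spec_solution solution solution_alt
  simp only [List.foldl_cons]
  have hinit : pvDpStep ([], 0) 0 = ([((0 : Int), (1 : Int))], 1) := by decide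
  rw [hinit]
  have h := pvFold ((PySem.List.sorted lines (fun l => l.1)).map (fun l => l.2))
    [0] [((0 : Int), (1 : Int))] 1 pvInv_init
  omega
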